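-- pv_equiv track=rewrite | github.com/Milchevskiy/TruMPET.2025 | Train.LSTM/parse_loop.py | parse_loop
-- ===== SOURCE A (Python) =====
-- def parse_loop(lines,
--                first_loop_item_name,
--                filter_field=None,
--                filter_value=None):
--     """
--     Парсит блок данных, начинающийся с тега first_loop_item_name.
--     Собирает подряд все _теги_ (пока они идут), затем строки данных
--     до первой пустой или начинающейся с '#'.
--
--     Если заданы filter_field и filter_value, отбирает только строки,
--     где колонка filter_field == filter_value.
--     """
--     fields = []
--     data = {}
--     it = iter(lines)
--
--     # 1) Найти первый тэг полей
--     for line in it: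
--         if line.strip() == first_loop_item_name:
--             fields.append(first_loop_item_name)
--             break
--     else:
--         raise ValueError(f"Не найден тэг {first_loop_item_name!r}")
--
--     # 2) Собирать все следующие тэги (строки, начинающиеся с '_')
--     for line in it:
--         tag = line.strip()
--         if tag.startswith("_"):
--             fields.append(tag)
--         else:
--             # первая строка данных
--             first_data = line
--             break
--
--     if not fields:
--         raise ValueError(f"Не найдено ни одного поля после {first_loop_item_name}")
--
--     # 3) Проверка фильтра
--     if filter_field:
--         if filter_field not in fields:
--             raise ValueError(f"Поле фильтра {filter_field!r} не найдено среди {fields}")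
--         idx_filter = fields.index(filter_field)
--     else:
--         idx_filter = None
--
--     # 4) Инициализируем пустые списки под все поля
--     data = {fld: [] for fld in fields}
--
--     # 5) Функция обработки одной строки данных
--     def process_row(row):
--         cols = row.split()
--         if len(cols) != len(fields):
--             raise ValueError(f"Ожидалось {len(fields)} колонок, а получили {len(cols)}: {cols}")
--         # проверка фильтра
--         if idx_filter is not None and cols[idx_filter] != filter_value:
--             return
--         for fld, val in zip(fields, cols):
--             data[fld].append(val)
--
--     # 6) Обработать первую строку данных, если она не комментарий
--     if first_data and not first_data.lstrip().startswith("#"):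
--         process_row(first_data)
--
--     # 7) Дальше все строки до пустой или '#'
--     for line in it:
--         s = line.strip()
--         if not s or s.startswith("#"):
--             break
--         process_row(line)
--
--     return data
-- ===== SOURCE B (Python) =====
-- def parse_loop(lines,
--                first_loop_item_name,
--                filter_field=None,
--                filter_value=None):
--     """Single state-machine pass over the iterator; kept rows are collected
--     row-major and the field->column dict is built once by transposition at the end."""
--     fields = []
--     rows = []
--     idx = None
--     state = "anchor"
--     for line in lines:
--         if state == "anchor":
--             if line.strip() == first_loop_item_name:
--                 fields = [first_loop_item_name]
--                 state = "tags"
--         elif state == "tags":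
--             tag = line.strip()
--             if tag.startswith("_"):
--                 fields.append(tag)
--                 continue
--             if filter_field:
--                 if filter_field not in fields:
--                     raise ValueError(f"Поле фильтра {filter_field!r} не найдено среди {fields}")
--                 idx = fields.index(filter_field)
--             state = "data"
--             if line and not line.lstrip().startswith("#"):
--                 _take_row(line, fields, idx, filter_value, rows)
--         else:
--             s = line.strip()
--             if not s or s.startswith("#"):
--                 break
--             _take_row(line, fields, idx, filter_value, rows)
--     if state != "data":
--         raise ValueError(f"Не найден тэг {first_loop_item_name!r}"
--                          if state == "anchor" else
--                          f"Не найдено ни одной строки данных после {first_loop_item_name}")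
--     return {f: [r[i] for r in rows] for i, f in enumerate(fields)}
--
--
-- def _take_row(row, fields, idx, filter_value, rows):
--     cols = row.split()
--     if len(cols) != len(fields):
--         raise ValueError(f"Ожидалось {len(fields)} колонок, а получили {len(cols)}: {cols}")
--     if idx is None or cols[idx] == filter_value:
--         rows.append(cols)
-- ===== Notes on version B (the rewrite author's own statement) =====
-- stated objective: alternative
-- what changed: A's three separate phase-loops with a nested process_row that appends each value into per-field dict lists are replaced by one state-machine pass ('anchor'/'tags'/'data') that collects the kept rows row-major and builds the field-to-column dict by a single transposition at the end.
-- outside the precondition, e.g. on parse_loop(['_a', '_a', 'x y'], '_a', None, None): A returns {'_a': ['x', 'y']}, B returns {'_a': ['y']}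
import Mathlib
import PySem

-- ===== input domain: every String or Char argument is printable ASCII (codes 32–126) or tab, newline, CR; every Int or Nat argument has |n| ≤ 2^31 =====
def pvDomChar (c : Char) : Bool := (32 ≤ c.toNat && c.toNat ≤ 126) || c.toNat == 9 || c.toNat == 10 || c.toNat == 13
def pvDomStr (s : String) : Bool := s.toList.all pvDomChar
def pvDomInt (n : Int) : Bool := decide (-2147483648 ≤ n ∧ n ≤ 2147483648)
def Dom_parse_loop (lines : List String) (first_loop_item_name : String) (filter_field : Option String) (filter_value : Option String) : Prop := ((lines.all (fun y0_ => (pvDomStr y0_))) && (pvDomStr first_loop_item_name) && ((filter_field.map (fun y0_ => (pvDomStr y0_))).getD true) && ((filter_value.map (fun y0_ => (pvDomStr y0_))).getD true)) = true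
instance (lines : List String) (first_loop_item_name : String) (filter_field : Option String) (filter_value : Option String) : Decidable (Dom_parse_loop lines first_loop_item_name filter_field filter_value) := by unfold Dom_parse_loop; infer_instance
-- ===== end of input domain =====

-- B makes one state-machine pass that collects the kept rows row-major and builds the field → column dict by a single
-- transposition at the end, instead of A's three phase-loops appending into per-field lists row by row; the equivalence
-- is about the RETURN value (neither program mutates its arguments).

-- ===== PORT A =====
-- step 1: 'for line in it: if line.strip() == name: break' ; none = the for-else ValueError
def aFindAnchor (name : String) : List String → Option (List String)
  | [] => none
  | l :: ls => if PySem.Str.strip l = name then some ls else aFindAnchor name ls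

-- step 2: collect '_'-tags; returns (tags, first_data, remaining iterator);
-- none = iterator exhausted, so 'first_data' stays unbound and step 6 raises NameError
def aCollectTags : List String → Option (List String × String × List String)
  | [] => none
  | l :: ls =>
    if PySem.Str.startswith (PySem.Str.strip l) "_" then
      match aCollectTags ls with
      | none => none
      | some (tags, fd, rest) => some (PySem.Str.strip l :: tags, fd, rest)
    else
      some ([], l, ls)

-- step 5: process_row; none = ValueError on column-count mismatch.
-- cols[idx_filter] is ported as cols.getD i "" (exact: i < len(fields) = len(cols) whenever it is evaluated)
def aProcessRow (fields : List String) (idx : Option Nat) (fv : Option String)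
    (data : PySem.Dict String (List String)) (row : String) :
    Option (PySem.Dict String (List String)) :=
  let cols := PySem.Str.split₀ row
  if cols.length ≠ fields.length then none
  else
    match idx with
    | some i =>
      if some (cols.getD i "") ≠ fv then some data
      else some ((fields.zip cols).foldl (fun d p => d.modify p.1 [] (fun x => x ++ [p.2])) data)
    | none => some ((fields.zip cols).foldl (fun d p => d.modify p.1 [] (fun x => x ++ [p.2])) data)

-- step 7: remaining lines until an empty/'#' line
def aDataLoop (fields : List String) (idx : Option Nat) (fv : Option String) :
    PySem.Dict String (List String) → List String → Option (PySem.Dict String (List String))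
  | data, [] => some data
  | data, l :: ls =>
    let s := PySem.Str.strip l
    if s = "" ∨ PySem.Str.startswith s "#" then some data
    else
      match aProcessRow fields idx fv data l with
      | none => none
      | some d => aDataLoop fields idx fv d ls

def parse_loop (lines : List String) (first_loop_item_name : String) (filter_field : Option String) (filter_value : Option String) : List (String × List String) :=
  match aFindAnchor first_loop_item_name lines with
  | none => []      -- ValueError: tag not found (excluded by Pre_)
  | some it1 =>
    match aCollectTags it1 with
    | none => []    -- 'first_data' unbound → NameError at step 6 (excluded by Pre_)
    | some (tags, first_data, rest) =>
      let fields := first_loop_item_name :: tags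
      -- A's 'if not fields: raise' is dead code: fields is nonempty by construction
      -- step 3: 'if filter_field:' (truthiness); 'filter_field not in fields' ↔ fields.index gives none
      match (match filter_field with
             | none => some none
             | some f =>
               if f = "" then some none
               else match PySem.List.index? fields f with
                    | none => none          -- ValueError: filter field not among fields (excluded by Pre_)
                    | some i => some (some i)) with
      | none => []
      | some idx =>
        -- step 4: data = {fld: [] for fld in fields}
        let data := fields.foldl (fun d fld => d.insert fld ([] : List String)) PySem.Dict.empty
        -- step 6: 'if first_data and not first_data.lstrip().startswith("#")'
        match (if first_data ≠ "" ∧ ¬ PySem.Str.startswith (PySem.Str.lstrip first_data) "#"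
               then aProcessRow fields idx filter_value data first_data
               else some data) with
        | none => []
        | some d =>
          match aDataLoop fields idx filter_value d rest with
          | none => []
          | some d2 => d2.items

-- ===== PORT B =====
-- _take_row: none = ValueError on column-count mismatch; cols[idx] ported as cols.getD i "" (exact: i < len(cols))
def bTakeRow (fields : List String) (idx : Option Nat) (fv : Option String)
    (rows : List (List String)) (row : String) : Option (List (List String)) :=
  let cols := PySem.Str.split₀ row
  if cols.length ≠ fields.length then none
  else
    match idx with
    | none => some (rows ++ [cols])
    | some i => if some (cols.getD i "") = fv then some (rows ++ [cols]) else some rows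

-- state == "data"
def bData (fields : List String) (idx : Option Nat) (fv : Option String) :
    List (List String) → List String → Option (List String × List (List String))
  | rows, [] => some (fields, rows)
  | rows, l :: ls =>
    let s := PySem.Str.strip l
    if s = "" ∨ PySem.Str.startswith s "#" then some (fields, rows)
    else
      match bTakeRow fields idx fv rows l with
      | none => none
      | some rows' => bData fields idx fv rows' ls

-- state == "tags"; none = a raise (filter field absent / bad column count) or loop ends before state "data"
def bTags (ff fv : Option String) :
    List String → List String → Option (List String × List (List String))
  | _, [] => none
  | fields, l :: ls =>
    let tag := PySem.Str.strip l
    if PySem.Str.startswith tag "_" then bTags ff fv (fields ++ [tag]) ls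
    else
      match (match ff with
             | none => some none
             | some f =>
               if f = "" then some none
               else match PySem.List.index? fields f with
                    | none => none
                    | some i => some (some i)) with
      | none => none
      | some idx =>
        match (if l ≠ "" ∧ ¬ PySem.Str.startswith (PySem.Str.lstrip l) "#"
               then bTakeRow fields idx fv [] l
               else some []) with
        | none => none
        | some rows => bData fields idx fv rows ls

-- state == "anchor"
def bAnchor (name : String) (ff fv : Option String) :
    List String → Option (List String × List (List String))
  | [] => none
  | l :: ls => if PySem.Str.strip l = name then bTags ff fv [name] ls else bAnchor name ff fv ls

def parse_loop_alt (lines : List String) (first_loop_item_name : String) (filter_field : Option String) (filter_value : Option String) : List (String × List String) :=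
  match bAnchor first_loop_item_name filter_field filter_value lines with
  | none => []
  | some (fields, rows) =>
    -- {f: [r[i] for r in rows] for i, f in enumerate(fields)}; r[i] ported as pyGetD (exact: i < len(fields) = len(r))
    ((PySem.List.enumerate fields).foldl
      (fun d p => d.insert p.2 (rows.map (fun r => PySem.List.pyGetD r p.1 "")))
      PySem.Dict.empty).items

-- ===== PRECONDITION & SPEC =====
def pvTag (l : String) : Bool := PySem.Str.startswith (PySem.Str.strip l) "_"
def pvStop (l : String) : Bool := (PySem.Str.strip l == "") || PySem.Str.startswith (PySem.Str.strip l) "#"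
def pvFirstCond (l : String) : Bool := !(l == "") && !(PySem.Str.startswith (PySem.Str.lstrip l) "#")

-- Pre_ excludes (a) the inputs where A raises: no line strips to the anchor tag, or the lines end inside the tag
-- block (NameError on 'first_data'), or a truthy filter field is not among the fields, or a processed data row has
-- the wrong column count; and (b) the defensible corner where the collected field tags contain duplicates, on which
-- A's per-row dict-reinsertion interleaving is accidental (duplicate dict keys), while B keeps one column per key.
def Pre_parse_loop (lines : List String) (first_loop_item_name : String) (filter_field : Option String) (filter_value : Option String) : Prop :=
  let rest := lines.dropWhile (fun l => !(PySem.Str.strip l == first_loop_item_name))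
  let after := rest.tail
  let rem := after.dropWhile pvTag
  let fields := first_loop_item_name :: (after.takeWhile pvTag).map PySem.Str.strip
  let fd := rem.headD ""
  rest ≠ [] ∧ rem ≠ [] ∧ fields.Nodup ∧
  (filter_field.getD "" ≠ "" → filter_field.getD "" ∈ fields) ∧
  (∀ row ∈ (if pvFirstCond fd then [fd] else []) ++ rem.tail.takeWhile (fun l => !pvStop l),
     (PySem.Str.split₀ row).length = fields.length)
instance (lines : List String) (first_loop_item_name : String) (filter_field : Option String) (filter_value : Option String) : Decidable (Pre_parse_loop lines first_loop_item_name filter_field filter_value) := by unfold Pre_parse_loop; infer_instance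

def pvWitness_parse_loop : List String × String × Option String × Option String :=
  (["_n", "_x", "a 1", ""], "_n", some "_x", some "1")

def Spec_parse_loop (lines : List String) (first_loop_item_name : String) (filter_field : Option String) (filter_value : Option String) (out : List (String × List String)) : Prop := out = parse_loop_alt lines first_loop_item_name filter_field filter_value
instance (lines : List String) (first_loop_item_name : String) (filter_field : Option String) (filter_value : Option String) (out : List (String × List String)) : Decidable (Spec_parse_loop lines first_loop_item_name filter_field filter_value out) := by unfold Spec_parse_loop; infer_instance

-- ===== CLAIM =====
def Claim_equal_parse_loop : Prop := ∀ (lines : List String) (first_loop_item_name : String) (filter_field : Option String) (filter_value : Option String), Dom_parse_loop lines first_loop_item_name filter_field filter_value → Pre_parse_loop lines first_loop_item_name filter_field filter_value → Spec_parse_loop lines first_loop_item_name filter_field filter_value (parse_loop lines first_loop_item_name filter_field filter_value)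

-- ===== LEMMAS AND PROOFS =====

-- the filter test a kept row passes
def pvPass (idx : Option Nat) (fv : Option String) (cols : List String) : Bool :=
  match idx with
  | none => true
  | some i => some (cols.getD i "") == fv

-- the kept (filter-passing) rows, as column lists
def pvKept (idx : Option Nat) (fv : Option String) (rows : List String) : List (List String) :=
  (rows.map PySem.Str.split₀).filter (pvPass idx fv)

-- the association list both programs denote: field at position i ↦ column i of every kept row
def pvItems (fields : List String) (K : List (List String)) : List (String × List String) :=
  fields.zipIdx.map (fun p => (p.1, K.map (fun cols => cols.getD p.2 "")))

theorem map_fst_pvItems (fields : List String) (K : List (List String)) :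
    (pvItems fields K).map Prod.fst = fields := by
  simp [pvItems, Function.comp_def]

theorem keys_pvItems (fields : List String) (K : List (List String)) :
    (PySem.Dict.mk (pvItems fields K)).keys = fields := by
  simp only [PySem.Dict.keys]
  exact map_fst_pvItems fields K

theorem getElem_pvItems (fields : List String) (K : List (List String)) (i : Nat)
    (hi : i < fields.length) :
    (pvItems fields K)[i]'(by simpa [pvItems] using hi)
      = (fields[i], K.map (fun cols => cols.getD i "")) := by
  simp [pvItems]

theorem zip_filter_not_mem (fields cols : List String) (x : String) (hx : x ∉ fields) :
    (fields.zip cols).filter (fun p => p.1 == x) = [] := by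
  induction fields generalizing cols with
  | nil => simp
  | cons f fs ih =>
    cases cols with
    | nil => simp
    | cons c cs =>
      have hfx : ¬ (f = x) := fun h => hx (h ▸ List.mem_cons_self)
      simp only [List.zip_cons_cons, List.filter_cons]
      simp only [beq_iff_eq, hfx]
      exact ih cs (fun h => hx (List.mem_cons_of_mem _ h))

theorem zip_filter_nodup (fields cols : List String) (hn : fields.Nodup)
    (hl : cols.length = fields.length) (i : Nat) (hi : i < fields.length) :
    (fields.zip cols).filter (fun p => p.1 == fields[i]) = [(fields[i], cols.getD i "")] := by
  induction fields generalizing cols i with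
  | nil => simp at hi
  | cons f fs ih =>
    cases cols with
    | nil => simp at hl
    | cons c cs =>
      simp only [List.zip_cons_cons, List.filter_cons]
      cases i with
      | zero =>
        simp only [List.getElem_cons_zero, beq_self_eq_true, List.getD]
        have : f ∉ fs := (List.nodup_cons.mp hn).1
        rw [zip_filter_not_mem fs cs f this]
        simp
      | succ j =>
        have hj : j < fs.length := by simpa using hi
        have hne : ¬ (f = fs[j]) := by
          intro h; exact (List.nodup_cons.mp hn).1 (h ▸ List.getElem_mem hj)
        simp only [List.getElem_cons_succ, beq_iff_eq, hne]
        have := ih cs (List.nodup_cons.mp hn).2 (by simpa using hl) j hj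
        simpa [List.getD] using this

theorem pvItems_nil_eq (fields : List String) :
    pvItems fields [] = fields.map (fun f => (f, ([] : List String))) := by
  unfold pvItems
  conv_rhs => rw [← List.zipIdx_map_fst 0 fields, List.map_map]
  simp

theorem data0_eq (fields : List String) (hn : fields.Nodup) :
    fields.foldl (fun d fld => d.insert fld ([] : List String)) PySem.Dict.empty
      = PySem.Dict.mk (pvItems fields []) := by
  apply PySem.Dict.ext
  have h := PySem.Dict.items_foldl_insert_fresh fields (fun f => f) (fun _ => ([] : List String))
      PySem.Dict.empty (by intro a _; simp) (by simpa using hn)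
  simp only [h]
  rw [pvItems_nil_eq]
  rfl

theorem modify_fold_pvItems (fields cols : List String) (K : List (List String))
    (hn : fields.Nodup) (hl : cols.length = fields.length) :
    (fields.zip cols).foldl (fun d p => d.modify p.1 [] (fun x => x ++ [p.2]))
      (PySem.Dict.mk (pvItems fields K)) = PySem.Dict.mk (pvItems fields (K ++ [cols])) := by
  apply PySem.Dict.ext
  have hk0 : (PySem.Dict.mk (pvItems fields K)).keys = fields := keys_pvItems fields K
  have hn0 : (PySem.Dict.mk (pvItems fields K)).keys.Nodup := by rw [hk0]; exact hn
  have hkeys : ((fields.zip cols).foldl (fun d p => d.modify p.1 [] (fun x => x ++ [p.2]))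
      (PySem.Dict.mk (pvItems fields K))).keys = fields := by
    have := PySem.Dict.keys_foldl_modify_key (fields.zip cols) Prod.fst ([] : List String)
      (fun _ p => (fun x => x ++ [p.2])) (PySem.Dict.mk (pvItems fields K))
    rw [this, List.map_fst_zip (by omega), hk0, PySem.Set.update_eq_append_filter]
    have : (PySem.Set.ofList fields).filter (fun y => !(PySem.Set.contains fields y)) = [] := by
      apply List.filter_eq_nil_iff.mpr
      intro y hy
      have : y ∈ fields := (PySem.Set.mem_ofList _ _).mp hy
      simp [(PySem.Set.contains_iff fields y).mpr this]
      exact this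
    rw [this, List.append_nil]
  have hnk : ((fields.zip cols).foldl (fun d p => d.modify p.1 [] (fun x => x ++ [p.2]))
      (PySem.Dict.mk (pvItems fields K))).keys.Nodup :=
    PySem.Dict.nodup_keys_foldl_modify_key _ _ _ _ _ hn0
  rw [PySem.Dict.items_eq_map_keys _ hnk ([] : List String), hkeys]
  apply List.ext_getElem (by simp [pvItems])
  intro i hi hi'
  have hif : i < fields.length := by simpa using hi
  rw [List.getElem_map]
  rw [getElem_pvItems fields (K ++ [cols]) i hif]
  refine Prod.ext rfl ?_
  show ((fields.zip cols).foldl (fun d p => d.modify p.1 [] (fun x => x ++ [p.2]))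
      (PySem.Dict.mk (pvItems fields K))).getD fields[i] [] = _
  rw [PySem.Dict.getD_foldl_modify_append]
  have hmem : (fields[i], K.map (fun cols => cols.getD i "")) ∈ pvItems fields K := by
    rw [← getElem_pvItems fields K i hif]
    exact List.getElem_mem _
  have hgetD : (PySem.Dict.mk (pvItems fields K)).getD fields[i] []
      = K.map (fun cols => cols.getD i "") :=
    PySem.Dict.getD_of_mem_items _ hmem hn0 []
  rw [hgetD, zip_filter_nodup fields cols hn hl i hif]
  simp

theorem pvKept_single (idx : Option Nat) (fv : Option String) (row : String) :
    pvKept idx fv [row]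
      = if pvPass idx fv (PySem.Str.split₀ row) then [PySem.Str.split₀ row] else [] := by
  unfold pvKept
  cases hpv : pvPass idx fv (PySem.Str.split₀ row) <;> simp [List.filter, hpv]

theorem pvKept_cons (idx : Option Nat) (fv : Option String) (l : String) (t : List String) :
    pvKept idx fv (l :: t) = pvKept idx fv [l] ++ pvKept idx fv t := by
  unfold pvKept
  cases h : pvPass idx fv (PySem.Str.split₀ l) <;> simp [List.filter_cons, h]

theorem pvStop_iff (l : String) :
    pvStop l = true ↔ (PySem.Str.strip l = "" ∨ PySem.Str.startswith (PySem.Str.strip l) "#") := by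
  simp [pvStop]

theorem aProcessRow_eq (fields : List String) (idx : Option Nat) (fv : Option String)
    (K : List (List String)) (row : String) (hn : fields.Nodup)
    (hl : (PySem.Str.split₀ row).length = fields.length) :
    aProcessRow fields idx fv (PySem.Dict.mk (pvItems fields K)) row
      = some (PySem.Dict.mk (pvItems fields (K ++ pvKept idx fv [row]))) := by
  unfold aProcessRow
  rw [pvKept_single]
  simp only [hl, ne_eq, not_true_eq_false, if_false, ite_false]
  cases idx with
  | none =>
    simp only [pvPass, if_true]
    rw [modify_fold_pvItems fields _ K hn hl]
  | some i =>
    simp only [pvPass, beq_iff_eq]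
    by_cases hp : some ((PySem.Str.split₀ row).getD i "") = fv
    · rw [if_neg (by simpa using hp), if_pos hp, modify_fold_pvItems fields _ K hn hl]
    · rw [if_pos (by simpa using hp), if_neg hp]
      simp

theorem aDataLoop_eq (fields : List String) (idx : Option Nat) (fv : Option String)
    (rest : List String) (K : List (List String)) (hn : fields.Nodup)
    (hr : ∀ r ∈ rest.takeWhile (fun l => !pvStop l), (PySem.Str.split₀ r).length = fields.length) :
    aDataLoop fields idx fv (PySem.Dict.mk (pvItems fields K)) rest
      = some (PySem.Dict.mk (pvItems fields
          (K ++ pvKept idx fv (rest.takeWhile (fun l => !pvStop l))))) := by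
  induction rest generalizing K with
  | nil => simp [aDataLoop, pvKept]
  | cons l ls ih =>
    rw [List.takeWhile_cons] at hr ⊢
    by_cases hstop : pvStop l = true
    · simp only [hstop, Bool.not_true, if_false]
      unfold aDataLoop
      rw [if_pos (pvStop_iff l |>.mp hstop)]
      simp [pvKept]
    · have hstop' : ¬ (PySem.Str.strip l = "" ∨ PySem.Str.startswith (PySem.Str.strip l) "#") :=
        fun h => hstop ((pvStop_iff l).mpr h)
      simp only [Bool.not_eq_true] at hstop
      simp only [hstop, Bool.not_false, if_true] at hr ⊢
      unfold aDataLoop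
      rw [if_neg hstop']
      have hl : (PySem.Str.split₀ l).length = fields.length := hr l (List.mem_cons_self)
      rw [aProcessRow_eq fields idx fv K l hn hl]
      simp only []
      rw [ih (K ++ pvKept idx fv [l]) (fun r hrm => hr r (List.mem_cons_of_mem _ hrm)),
        pvKept_cons]
      simp only [pvKept, List.map_nil, List.filter_nil, List.append_nil, List.map_cons,
        List.append_assoc]
      cases h : pvPass idx fv (PySem.Str.split₀ l) <;> simp [List.filter_cons, h]

theorem bTakeRow_eq (fields : List String) (idx : Option Nat) (fv : Option String)
    (rows : List (List String)) (row : String)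
    (hl : (PySem.Str.split₀ row).length = fields.length) :
    bTakeRow fields idx fv rows row = some (rows ++ pvKept idx fv [row]) := by
  unfold bTakeRow
  rw [pvKept_single]
  simp only [hl, ne_eq, not_true_eq_false, if_false, ite_false]
  cases idx with
  | none => simp [pvPass]
  | some i =>
    simp only [pvPass, beq_iff_eq]
    split <;> simp_all

theorem bData_eq (fields : List String) (idx : Option Nat) (fv : Option String)
    (rest : List String) (rows : List (List String))
    (hr : ∀ r ∈ rest.takeWhile (fun l => !pvStop l), (PySem.Str.split₀ r).length = fields.length) :
    bData fields idx fv rows rest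
      = some (fields, rows ++ pvKept idx fv (rest.takeWhile (fun l => !pvStop l))) := by
  induction rest generalizing rows with
  | nil => simp [bData, pvKept]
  | cons l ls ih =>
    rw [List.takeWhile_cons] at hr ⊢
    by_cases hstop : pvStop l = true
    · simp only [hstop, Bool.not_true, if_false]
      unfold bData
      rw [if_pos (pvStop_iff l |>.mp hstop)]
      simp [pvKept]
    · have hstop' : ¬ (PySem.Str.strip l = "" ∨ PySem.Str.startswith (PySem.Str.strip l) "#") :=
        fun h => hstop ((pvStop_iff l).mpr h)
      simp only [Bool.not_eq_true] at hstop
      simp only [hstop, Bool.not_false, if_true] at hr ⊢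
      unfold bData
      rw [if_neg hstop']
      have hl : (PySem.Str.split₀ l).length = fields.length := hr l (List.mem_cons_self)
      rw [bTakeRow_eq fields idx fv rows l hl]
      simp only []
      rw [ih (rows ++ pvKept idx fv [l]) (fun r hrm => hr r (List.mem_cons_of_mem _ hrm)),
        pvKept_cons]
      simp only [pvKept, List.map_nil, List.filter_nil, List.append_nil, List.map_cons,
        List.append_assoc]
      cases h : pvPass idx fv (PySem.Str.split₀ l) <;> simp [List.filter_cons, h]

theorem transpose_eq (fields : List String) (rows : List (List String)) (hn : fields.Nodup) :
    ((PySem.List.enumerate fields).foldl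
      (fun d p => d.insert p.2 (rows.map (fun r => PySem.List.pyGetD r p.1 "")))
      PySem.Dict.empty).items = pvItems fields rows := by
  have h := PySem.Dict.items_foldl_insert_fresh (PySem.List.enumerate fields)
      (fun p => p.2) (fun p => rows.map (fun r => PySem.List.pyGetD r p.1 ""))
      (PySem.Dict.empty)
      (by intro a _; rfl)
      (by rw [show (fun (p : Int × String) => p.2) = (fun p => Prod.snd p) from rfl,
              PySem.List.map_snd_enumerate]; exact hn)
  rw [h, show (PySem.Dict.empty : PySem.Dict String (List String)).items = [] from rfl,
     List.nil_append]
  apply List.ext_getElem (by simp [pvItems, PySem.List.length_enumerate])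
  intro i hi hi'
  have hif : i < fields.length := by simpa [PySem.List.length_enumerate] using hi
  have he : i < (PySem.List.enumerate fields 0).length := by
    simpa [PySem.List.length_enumerate] using hif
  simp only [List.getElem_map, pvItems]
  rw [PySem.List.getElem_enumerate fields 0 i he]
  simp [PySem.List.pyGetD_natCast]

theorem aFindAnchor_eq (name : String) (ls : List String) :
    aFindAnchor name ls =
      match ls.dropWhile (fun l => !(PySem.Str.strip l == name)) with
      | [] => none
      | _ :: t => some t := by
  induction ls with
  | nil => rfl
  | cons l ls ih =>
    rw [List.dropWhile_cons]
    by_cases h : PySem.Str.strip l = name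
    · simp [aFindAnchor, h]
    · simp [aFindAnchor, h, ih]

theorem bAnchor_eq (name : String) (ff fv : Option String) (ls : List String) :
    bAnchor name ff fv ls =
      match ls.dropWhile (fun l => !(PySem.Str.strip l == name)) with
      | [] => none
      | _ :: t => bTags ff fv [name] t := by
  induction ls with
  | nil => rfl
  | cons l ls ih =>
    rw [List.dropWhile_cons]
    by_cases h : PySem.Str.strip l = name
    · simp [bAnchor, h]
    · simp [bAnchor, h, ih]

theorem aCollectTags_eq (ls : List String) :
    aCollectTags ls =
      match ls.dropWhile pvTag with
      | [] => none
      | fd :: rest => some ((ls.takeWhile pvTag).map PySem.Str.strip, fd, rest) := by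
  induction ls with
  | nil => rfl
  | cons l ls ih =>
    rw [List.dropWhile_cons, List.takeWhile_cons]
    by_cases h : pvTag l = true
    · simp only [h, if_true]
      have h' : PySem.Str.startswith (PySem.Str.strip l) "_" = true := h
      simp only [aCollectTags, h', if_true, ih]
      cases hd : ls.dropWhile pvTag with
      | nil => simp
      | cons fd rest => simp
    · have h' : PySem.Str.startswith (PySem.Str.strip l) "_" = false := by
        revert h; unfold pvTag; cases PySem.Str.startswith (PySem.Str.strip l) "_" <;> simp
      simp only [aCollectTags, h', Bool.false_eq_true, if_false, h]
      simp

theorem bTags_eq (ff fv : Option String) (ls fields : List String) :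
    bTags ff fv fields ls
      = bTags ff fv (fields ++ (ls.takeWhile pvTag).map PySem.Str.strip)
          (ls.dropWhile pvTag) := by
  induction ls generalizing fields with
  | nil => simp [bTags]
  | cons l ls ih =>
    rw [List.dropWhile_cons, List.takeWhile_cons]
    by_cases h : pvTag l = true
    · have h' : PySem.Str.startswith (PySem.Str.strip l) "_" = true := h
      have hstep : bTags ff fv fields (l :: ls)
          = bTags ff fv (fields ++ [PySem.Str.strip l]) ls := by
        simp only [bTags, h', if_true]
      simp only [h, if_true, List.map_cons]
      rw [hstep, ih (fields ++ [PySem.Str.strip l]), List.append_assoc]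
      rfl
    · have h' : PySem.Str.startswith (PySem.Str.strip l) "_" = false := by
        revert h; unfold pvTag; cases PySem.Str.startswith (PySem.Str.strip l) "_" <;> simp
      simp [h]

theorem pvFirstCond_iff (l : String) :
    pvFirstCond l = true ↔ (l ≠ "" ∧ ¬ PySem.Str.startswith (PySem.Str.lstrip l) "#" = true) := by
  simp [pvFirstCond]

-- ===== VERDICT =====
theorem parse_loop_spec : Claim_equal_parse_loop := by
  intro lines name ff fv _ hPre
  unfold Spec_parse_loop parse_loop parse_loop_alt
  simp only [Pre_parse_loop] at hPre
  obtain ⟨h1, h2, hnodup, hff, hlen⟩ := hPre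
  rw [aFindAnchor_eq, bAnchor_eq]
  cases hr : lines.dropWhile (fun l => !(PySem.Str.strip l == name)) with
  | nil => exact absurd hr h1
  | cons r0 after =>
  rw [hr] at h2 hnodup hff hlen
  simp only [List.tail_cons] at h2 hnodup hff hlen
  simp only []
  rw [aCollectTags_eq, bTags_eq, List.singleton_append]
  cases hm : after.dropWhile pvTag with
  | nil => exact absurd hm h2
  | cons fd rest' =>
  rw [hm] at hlen
  simp only [List.headD_cons, List.tail_cons] at hlen
  have hfd : pvTag fd = false := by
    have h := List.dropWhile_get_zero_not pvTag after (by rw [hm]; simp)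
    simpa [hm] using h
  have hfd' : PySem.Str.startswith (PySem.Str.strip fd) "_" = false := hfd
  simp only [bTags, hfd', Bool.false_eq_true, if_false]
  set fields := name :: (after.takeWhile pvTag).map PySem.Str.strip with hfields
  cases hffv : (match ff with
      | none => (some none : Option (Option Nat))
      | some f =>
        if f = "" then some none
        else match PySem.List.index? fields f with
             | none => none
             | some i => some (some i)) with
  | none =>
    -- impossible under Pre_: the filter field is among the fields
    exfalso
    cases ff with
    | none => simp at hffv
    | some f =>
      by_cases hf : f = ""
      · simp [hf] at hffv
      · have hmem : f ∈ fields := by simpa [hf] using hff (by simpa using hf)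
        obtain ⟨i, hi⟩ := Option.isSome_iff_exists.mp
          ((PySem.List.index?_isSome_iff fields f).mpr hmem)
        rw [show (match some f with
            | none => (some none : Option (Option Nat))
            | some f =>
              if f = "" then some none
              else match PySem.List.index? fields f with
                   | none => none
                   | some i => some (some i)) =
            (if f = "" then some none
             else match PySem.List.index? fields f with
                  | none => none
                  | some i => some (some i)) from rfl, if_neg hf, hi] at hffv
        simp at hffv
  | some idx =>
  simp only []
  rw [data0_eq fields hnodup]
  by_cases hc : fd ≠ "" ∧ ¬ PySem.Str.startswith (PySem.Str.lstrip fd) "#" = true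
  · have hcb : pvFirstCond fd = true := (pvFirstCond_iff fd).mpr hc
    rw [hcb] at hlen
    simp only [if_true] at hlen
    have hlenfd : (PySem.Str.split₀ fd).length = fields.length :=
      hlen fd (List.mem_append_left _ List.mem_cons_self)
    have hrtail : ∀ r ∈ rest'.takeWhile (fun l => !pvStop l),
        (PySem.Str.split₀ r).length = fields.length :=
      fun r hrm => hlen r (List.mem_append_right _ hrm)
    rw [if_pos hc, if_pos hc, aProcessRow_eq fields idx fv [] fd hnodup hlenfd,
      bTakeRow_eq fields idx fv [] fd hlenfd]
    simp only []
    rw [aDataLoop_eq fields idx fv rest' ([] ++ pvKept idx fv [fd]) hnodup hrtail,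
      bData_eq fields idx fv rest' ([] ++ pvKept idx fv [fd]) hrtail]
    simp only []
    rw [transpose_eq fields _ hnodup]
  · have hcb : pvFirstCond fd = false := by
      cases h : pvFirstCond fd
      · rfl
      · exact absurd ((pvFirstCond_iff fd).mp h) hc
    rw [hcb] at hlen
    simp only [Bool.false_eq_true, if_false, List.nil_append] at hlen
    have hrtail : ∀ r ∈ rest'.takeWhile (fun l => !pvStop l),
        (PySem.Str.split₀ r).length = fields.length := hlen
    rw [if_neg hc, if_neg hc]
    simp only []
    rw [aDataLoop_eq fields idx fv rest' [] hnodup hrtail,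
      bData_eq fields idx fv rest' [] hrtail]
    simp only []
    rw [transpose_eq fields _ hnodup]
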